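-- pv_equiv track=rewrite | github.com/ait-aecid/anomaly-detection-log-datasets | evaluate.py | find_time_range_rec
-- ===== SOURCE A (Python) =====
-- import copy
--
-- def find_time_range_rec(start, goal, time_ranges, path, depth):
--     # Recursive function to find inter-arrival times of event pairs with some additional events in between
--     results = []
--     if depth > 1:
--         return []
--     for ep in time_ranges:
--         if ep[0] == start and ep[1] == goal:
--             return [path + [ep[0], ep[1]]]
--         if ep[0] == start:
--             time_ranges_tmp = copy.deepcopy(time_ranges)
--             del time_ranges_tmp[ep]
--             for rec_result in find_time_range_rec(ep[1], goal, time_ranges_tmp, path + [ep[0]], depth + 1):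
--                 results.append(rec_result)
--     return results
-- ===== SOURCE B (Python) =====
-- def find_time_range_rec(start, goal, time_ranges, path, depth):
--     # Iterative worklist DFS over an adjacency index (src -> [dst]) built once,
--     # tracking consumed edges with a set instead of deepcopy+delete.
--     adj = {}
--     for s, g in time_ranges:
--         adj.setdefault(s, []).append(g)
--     results = []
--     stack = [(start, path, depth, frozenset())]
--     while stack:
--         node, p, d, used = stack.pop()
--         if d > 1:
--             continue
--         outs = [g for g in adj.get(node, []) if (node, g) not in used]
--         if goal in outs:
--             results.append(p + [node, goal])
--         else:
--             stack.extend((g, p + [node], d + 1, used | {(node, g)})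
--                          for g in reversed(outs))
--     return results
-- ===== Notes on version B (the rewrite author's own statement) =====
-- stated objective: faster
-- what changed: B is iterative instead of recursive: it builds a src->[dst] adjacency index once and runs an explicit-stack worklist loop with a consumed-edge set, instead of A's recursion that deep-copies the whole edge dict and rescans every edge at every call.
import Mathlib
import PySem

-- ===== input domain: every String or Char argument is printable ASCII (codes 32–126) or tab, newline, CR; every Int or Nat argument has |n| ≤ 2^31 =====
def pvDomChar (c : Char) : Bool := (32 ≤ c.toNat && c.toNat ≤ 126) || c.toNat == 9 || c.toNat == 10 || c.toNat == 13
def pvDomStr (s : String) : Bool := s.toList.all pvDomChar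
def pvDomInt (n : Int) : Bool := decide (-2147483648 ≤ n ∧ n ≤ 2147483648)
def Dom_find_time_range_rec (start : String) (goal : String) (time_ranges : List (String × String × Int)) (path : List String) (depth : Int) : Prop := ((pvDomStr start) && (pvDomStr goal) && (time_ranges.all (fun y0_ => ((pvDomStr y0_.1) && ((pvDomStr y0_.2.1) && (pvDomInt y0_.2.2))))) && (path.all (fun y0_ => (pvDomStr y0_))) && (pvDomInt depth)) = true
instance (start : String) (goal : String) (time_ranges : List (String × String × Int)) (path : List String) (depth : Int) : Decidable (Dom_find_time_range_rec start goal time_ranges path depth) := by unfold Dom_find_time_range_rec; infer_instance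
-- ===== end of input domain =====

-- B replaces A's recursion-with-deepcopy+delete by an ITERATIVE worklist (explicit stack) over an
-- adjacency index src -> [dst] built once, tracking consumed edges with a set (objective: faster).
-- time_ranges models A's dict {(src, dst): time}: an association list of (src, dst, time) triples.

-- ===== PORT A =====
-- `del time_ranges_tmp[ep]`: remove the (single, under Pre_) entry whose (src, dst) key is k.
def pvErase (k : String × String) : List (String × String × Int) → List (String × String × Int)
  | [] => []
  | e :: rest => if e.1 = k.1 ∧ e.2.1 = k.2 then rest else e :: pvErase k rest

-- A's recursion, written with a fuel argument (trs shrinks by one at every nested call, so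
-- `trs.length + 1` fuel is always enough; the fuel only makes the recursion structural).
mutual
def pvALoop (n : Nat) (start goal : String) (trs : List (String × String × Int)) (path : List String) (depth : Int) (acc : List (List String)) (it : List (String × String × Int)) : List (List String) :=
  match it with
  | [] => acc
  | e :: rest =>
    if e.1 = start ∧ e.2.1 = goal then [path ++ [e.1, e.2.1]]
    else if e.1 = start then
      pvALoop n start goal trs path depth
        (acc ++ pvAFuel n e.2.1 goal (pvErase (e.1, e.2.1) trs) (path ++ [e.1]) (depth + 1)) rest
    else pvALoop n start goal trs path depth acc rest
termination_by (n, it.length)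

def pvAFuel (n : Nat) (start goal : String) (trs : List (String × String × Int)) (path : List String) (depth : Int) : List (List String) :=
  match n with
  | 0 => []
  | m + 1 => if depth > 1 then [] else pvALoop m start goal trs path depth [] trs
termination_by (n, 0)
end

def find_time_range_rec (start : String) (goal : String) (time_ranges : List (String × String × Int)) (path : List String) (depth : Int) : List (List String) :=
  pvAFuel (time_ranges.length + 1) start goal time_ranges path depth

-- ===== PORT B =====
-- Source B's `for s, g in time_ranges: adj.setdefault(s, []).append(g)`
-- (`for s, g in` unpacks the dict's (src, dst) keys; setdefault+append = Dict.modify with default []).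
def pvAdj (trs : List (String × String × Int)) : PySem.Dict String (List String) :=
  (trs.map (fun e => (e.1, e.2.1))).foldl (fun d p => PySem.Dict.modify d p.1 [] (fun l => l ++ [p.2])) PySem.Dict.empty

-- fuel bound for Source B's while loop: pvF N is ((u ↦ 1 + N*u) iterated); pvF N N bounds the total
-- number of iterations (each popped frame is replaced by ≤ N children, each with one more used edge).
def pvF (N : Nat) : Nat → Nat
  | 0 => 1
  | u + 1 => 1 + N * pvF N u

-- Source B's `while stack:` loop.  The Lean list models the Python stack with HEAD = TOP (python's
-- list end), so `stack.extend(child(g) for g in reversed(outs))` followed by later pops is exactly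
-- prepending `outs.map child`; `results.append` / `continue` are the accumulator updates below.
def pvBLoop (n : Nat) (goal : String) (adj : PySem.Dict String (List String)) (stack : List (String × List String × Int × PySem.Set (String × String))) (results : List (List String)) : List (List String) :=
  match n, stack with
  | _, [] => results
  | 0, _ => results   -- fuel exhausted; never reached with the fuel chosen (proved below)
  | m + 1, (node, p, d, used) :: rest =>
    if d > 1 then pvBLoop m goal adj rest results
    else
      let outs := (PySem.Dict.getD adj node []).filter (fun g => !(PySem.Set.contains used (node, g)))
      if outs.contains goal then pvBLoop m goal adj rest (results ++ [p ++ [node, goal]])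
      else pvBLoop m goal adj ((outs.map (fun g => (g, p ++ [node], d + 1, PySem.Set.add used (node, g)))) ++ rest) results

def find_time_range_rec_alt (start : String) (goal : String) (time_ranges : List (String × String × Int)) (path : List String) (depth : Int) : List (List String) :=
  pvBLoop (pvF time_ranges.length time_ranges.length) goal (pvAdj time_ranges) [(start, path, depth, PySem.Set.empty)] []

-- ===== PRECONDITION & SPEC =====
-- Pre_ excludes lists with duplicate (src, dst) keys: A's time_ranges is a Python dict keyed by
-- (src, dst), which cannot hold duplicate keys, so the association-list behaviour there is accidental.
def Pre_find_time_range_rec (start : String) (goal : String) (time_ranges : List (String × String × Int)) (path : List String) (depth : Int) : Prop :=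
  (time_ranges.map (fun e => (e.1, e.2.1))).Nodup
instance (start : String) (goal : String) (time_ranges : List (String × String × Int)) (path : List String) (depth : Int) : Decidable (Pre_find_time_range_rec start goal time_ranges path depth) := by unfold Pre_find_time_range_rec; infer_instance

def pvWitness_find_time_range_rec : String × String × (List (String × String × Int)) × List String × Int :=
  ("a", "b", [("a", "c", 1), ("c", "b", 2)], [], 0)

def Spec_find_time_range_rec (start : String) (goal : String) (time_ranges : List (String × String × Int)) (path : List String) (depth : Int) (out : List (List String)) : Prop := out = find_time_range_rec_alt start goal time_ranges path depth
instance (start : String) (goal : String) (time_ranges : List (String × String × Int)) (path : List String) (depth : Int) (out : List (List String)) : Decidable (Spec_find_time_range_rec start goal time_ranges path depth out) := by unfold Spec_find_time_range_rec; infer_instance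

-- ===== CLAIM (what is proved, stated in full; the proofs are below) =====
def Claim_equal_find_time_range_rec : Prop := ∀ (start : String) (goal : String) (time_ranges : List (String × String × Int)) (path : List String) (depth : Int), Dom_find_time_range_rec start goal time_ranges path depth → Pre_find_time_range_rec start goal time_ranges path depth → Spec_find_time_range_rec start goal time_ranges path depth (find_time_range_rec start goal time_ranges path depth)

-- ===== LEMMAS AND PROOFS =====

-- the (src, dst) key of an edge
def pvKey (e : String × String × Int) : String × String := (e.1, e.2.1)

-- proof-side recursive specification: both ports are proved equal to pvG
def pvG (n : Nat) (edges : List (String × String × Int)) (start goal : String) (path : List String) (depth : Int) (used : PySem.Set (String × String)) : List (List String) :=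
  match n with
  | 0 => []
  | m + 1 =>
    if depth > 1 then [] else
    let outs := (edges.filter (fun e => e.1 == start && !(PySem.Set.contains used (e.1, e.2.1)))).map (fun e => e.2.1)
    if outs.contains goal then [path ++ [start, goal]]
    else outs.foldl (fun res g => res ++ pvG m edges g goal (path ++ [start]) (depth + 1) (PySem.Set.add used (start, g))) []

-- number of not-yet-consumed edges
def pvU (trs : List (String × String × Int)) (used : PySem.Set (String × String)) : Nat :=
  (trs.filter (fun e => !(PySem.Set.contains used (pvKey e)))).length

def pvMeasure (trs : List (String × String × Int)) (stack : List (String × List String × Int × PySem.Set (String × String))) : Nat :=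
  (stack.map (fun fr => pvF trs.length (pvU trs fr.2.2.2))).sum

lemma pvErase_eq_filter (k : String × String) (l : List (String × String × Int))
    (h : (l.map pvKey).Nodup) :
    pvErase k l = l.filter (fun e => !(pvKey e == k)) := by
  induction l with
  | nil => rfl
  | cons e rest ih =>
    simp only [List.map_cons, List.nodup_cons] at h
    by_cases hk : e.1 = k.1 ∧ e.2.1 = k.2
    · have hke : pvKey e = k := by simp [pvKey, hk.1, hk.2]
      simp only [pvErase, if_pos hk, List.filter_cons, hke]
      simp only [BEq.rfl, Bool.not_true, if_false, Bool.false_eq_true]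
      rw [List.filter_eq_self.2]
      intro a ha
      have : ¬ (pvKey a == k) = true := by
        simp only [beq_iff_eq]
        intro hh
        exact h.1 (by rw [hke, ← hh]; exact List.mem_map_of_mem ha)
      simp [this]
    · have hke : ¬ (pvKey e == k) = true := by
        simp only [beq_iff_eq, pvKey, Prod.ext_iff]
        exact fun hh => hk ⟨hh.1, hh.2⟩
      simp only [pvErase, if_neg hk, List.filter_cons]
      simp only [hke, Bool.not_false]
      simp [ih h.2]

lemma pvErase_length_lt (k : String × String) (l : List (String × String × Int))
    (h : k ∈ l.map pvKey) : (pvErase k l).length < l.length := by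
  induction l with
  | nil => simp at h
  | cons e rest ih =>
    by_cases hk : e.1 = k.1 ∧ e.2.1 = k.2
    · simp [pvErase, if_pos hk]
    · have hrest : k ∈ rest.map pvKey := by
        rcases (List.mem_map.1 h) with ⟨a, ha, hak⟩
        rcases List.mem_cons.1 ha with ha | ha
        · subst ha
          exact absurd ⟨(Prod.ext_iff.1 hak).1, (Prod.ext_iff.1 hak).2⟩ hk
        · exact hak ▸ List.mem_map_of_mem ha
      simp only [pvErase, if_neg hk, List.length_cons]
      exact Nat.succ_lt_succ (ih hrest)

-- closed form of A's inner loop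
lemma pvALoop_char (n : Nat) (start goal : String) (trs : List (String × String × Int))
    (path : List String) (depth : Int) (acc : List (List String))
    (it : List (String × String × Int)) :
    pvALoop n start goal trs path depth acc it =
      if ∃ e ∈ it, e.1 = start ∧ e.2.1 = goal then [path ++ [start, goal]]
      else acc ++ (it.filter (fun e => e.1 == start)).flatMap
        (fun e => pvAFuel n e.2.1 goal (pvErase (e.1, e.2.1) trs) (path ++ [e.1]) (depth + 1)) := by
  induction it generalizing acc with
  | nil => simp [pvALoop]
  | cons e rest ih =>
    by_cases h1 : e.1 = start ∧ e.2.1 = goal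
    · rw [pvALoop]
      rw [if_pos h1, if_pos (⟨e, List.mem_cons_self, h1⟩ : ∃ x ∈ e :: rest, x.1 = start ∧ x.2.1 = goal)]
      rw [h1.1, h1.2]
    · by_cases h2 : e.1 = start
      · rw [pvALoop]
        simp only [if_neg h1, if_pos h2]
        rw [ih]
        have hcond : (∃ x ∈ e :: rest, x.1 = start ∧ x.2.1 = goal) ↔
            (∃ x ∈ rest, x.1 = start ∧ x.2.1 = goal) := by
          constructor
          · rintro ⟨x, hx, hxp⟩
            rcases List.mem_cons.1 hx with rfl | hx
            · exact absurd hxp h1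
            · exact ⟨x, hx, hxp⟩
          · rintro ⟨x, hx, hxp⟩; exact ⟨x, List.mem_cons_of_mem e hx, hxp⟩
        by_cases hr : ∃ x ∈ rest, x.1 = start ∧ x.2.1 = goal
        · rw [if_pos hr, if_pos (hcond.2 hr)]
        · rw [if_neg hr, if_neg (fun hc => hr (hcond.1 hc))]
          have hb : (e.1 == start) = true := beq_iff_eq.2 h2
          simp [hb]
      · rw [pvALoop]
        have h1' : ¬ (e.1 = start ∧ e.2.1 = goal) := h1
        simp only [if_neg h1', if_neg h2]
        rw [ih]
        have hcond : (∃ x ∈ e :: rest, x.1 = start ∧ x.2.1 = goal) ↔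
            (∃ x ∈ rest, x.1 = start ∧ x.2.1 = goal) := by
          constructor
          · rintro ⟨x, hx, hxp⟩
            rcases List.mem_cons.1 hx with rfl | hx
            · exact absurd hxp.1 h2
            · exact ⟨x, hx, hxp⟩
          · rintro ⟨x, hx, hxp⟩; exact ⟨x, List.mem_cons_of_mem e hx, hxp⟩
        have hb : ¬ (e.1 == start) = true := by simp [h2]
        by_cases hr : ∃ x ∈ rest, x.1 = start ∧ x.2.1 = goal
        · rw [if_pos hr, if_pos (hcond.2 hr)]
        · rw [if_neg hr, if_neg (fun hc => hr (hcond.1 hc))]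
          simp [hb]

lemma pvContains_add (s : PySem.Set (String × String)) (a b : String × String) :
    PySem.Set.contains (PySem.Set.add s a) b = (PySem.Set.contains s b || b == a) := by
  simp only [PySem.Set.add, PySem.Set.contains]
  by_cases hba : b = a
  · subst hba
    split_ifs with h <;> simp_all
  · have hb : (b == a) = false := beq_eq_false_iff_ne.2 hba
    split_ifs with h <;> simp_all

-- main invariant of the A side: A on the not-yet-used part of the edge list = pvG on the full list + used set
lemma pvMainA (trs0 : List (String × String × Int)) (hnd : (trs0.map pvKey).Nodup) :
    ∀ (n : Nat) (used : PySem.Set (String × String)) (trs' : List (String × String × Int))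
      (start goal : String) (path : List String) (depth : Int),
      trs' = trs0.filter (fun e => !(PySem.Set.contains used (pvKey e))) →
      trs'.length < n →
      pvAFuel n start goal trs' path depth = pvG n trs0 start goal path depth used := by
  intro n
  induction n with
  | zero => intro used trs' start goal path depth _ hlen; omega
  | succ m ih =>
    intro used trs' start goal path depth htr hlen
    simp only [pvAFuel, pvG]
    by_cases hd : depth > 1
    · simp [hd]
    · simp only [if_neg hd]
      rw [pvALoop_char]
      have hbase : trs'.filter (fun e => e.1 == start)
          = trs0.filter (fun e => e.1 == start && !(PySem.Set.contains used (e.1, e.2.1))) := by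
        rw [htr, List.filter_filter]
        rfl
      have hnd' : (trs'.map pvKey).Nodup := by
        rw [htr]
        exact List.Nodup.sublist (List.Sublist.map pvKey List.filter_sublist) hnd
      have hhit : (∃ e ∈ trs', e.1 = start ∧ e.2.1 = goal) ↔
          ((trs0.filter (fun e => e.1 == start && !(PySem.Set.contains used (e.1, e.2.1)))).map
            (fun e => e.2.1)).contains goal = true := by
        rw [← hbase]
        simp only [List.contains_iff_mem, List.mem_map, List.mem_filter, beq_iff_eq]
        constructor
        · rintro ⟨x, hx, h1, h2⟩; exact ⟨x, ⟨hx, h1⟩, h2⟩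
        · rintro ⟨x, ⟨hx, h1⟩, h2⟩; exact ⟨x, hx, h1, h2⟩
      by_cases hh : ∃ e ∈ trs', e.1 = start ∧ e.2.1 = goal
      · rw [if_pos hh, if_pos (hhit.1 hh)]
      · rw [if_neg hh, if_neg (fun hc => hh (hhit.2 hc))]
        rw [PySem.List.foldl_append_eq_flatMap, List.flatMap_map, List.nil_append, List.nil_append, ← hbase]
        apply List.flatMap_congr
        intro e he
        have he' : e ∈ trs' := (List.mem_filter.1 he).1
        have hes : e.1 = start := beq_iff_eq.1 (List.mem_filter.1 he).2
        rw [hes]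
        have hkey : ((start, e.2.1) : String × String) ∈ trs'.map pvKey := by
          rw [← hes]
          exact List.mem_map_of_mem he'
        have hlen' : (pvErase (start, e.2.1) trs').length < m := by
          have := pvErase_length_lt (start, e.2.1) trs' hkey
          omega
        have harg : pvErase (start, e.2.1) trs'
            = trs0.filter (fun x => !(PySem.Set.contains (PySem.Set.add used (start, e.2.1)) (pvKey x))) := by
          rw [pvErase_eq_filter _ _ hnd', htr, List.filter_filter]
          apply List.filter_congr
          intro x _
          rw [pvContains_add]
          simp [Bool.not_or, Bool.and_comm]
        exact ih _ _ _ _ _ _ harg hlen'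

-- ===== B-side lemmas =====

lemma pvU_le (trs : List (String × String × Int)) (used : PySem.Set (String × String)) :
    pvU trs used ≤ trs.length :=
  List.length_filter_le _ _

lemma pvU_add_lt (trs : List (String × String × Int)) (used : PySem.Set (String × String))
    (k : String × String) (e : String × String × Int) (he : e ∈ trs) (hk : pvKey e = k)
    (hu : PySem.Set.contains used k = false) :
    pvU trs (PySem.Set.add used k) < pvU trs used := by
  have hsplit : trs.filter (fun x => !(PySem.Set.contains (PySem.Set.add used k) (pvKey x)))
      = (trs.filter (fun x => !(PySem.Set.contains used (pvKey x)))).filter (fun x => !(pvKey x == k)) := by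
    rw [List.filter_filter]
    apply List.filter_congr
    intro x _
    rw [pvContains_add]
    simp [Bool.not_or, Bool.and_comm]
  unfold pvU
  rw [hsplit]
  apply List.length_filter_lt_length_iff_exists.2
  refine ⟨e, List.mem_filter.2 ⟨he, by simp only [hk, hu, Bool.not_false]⟩, by simp [hk]⟩

lemma pvF_pos (N u : Nat) : 1 ≤ pvF N u := by
  cases u <;> simp [pvF]

lemma pvF_le_succ (N u : Nat) : pvF N u ≤ pvF N (u + 1) := by
  induction u with
  | zero => simp [pvF]
  | succ v ih =>
    show pvF N (v + 1) ≤ pvF N (v + 1 + 1)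
    simp only [pvF]
    exact Nat.add_le_add_left (Nat.mul_le_mul_left N ih) 1

lemma pvF_mono (N : Nat) {u v : Nat} (h : u ≤ v) : pvF N u ≤ pvF N v := by
  induction h with
  | refl => exact Nat.le_refl _
  | step _ ih => exact Nat.le_trans ih (pvF_le_succ N _)

-- the adjacency index looks up exactly the successors recorded in edge order
lemma pvAdj_getD (trs : List (String × String × Int)) (s : String) :
    PySem.Dict.getD (pvAdj trs) s [] = (trs.filter (fun e => e.1 == s)).map (fun e => e.2.1) := by
  unfold pvAdj
  rw [PySem.Dict.getD_foldl_modify_append]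
  simp only [PySem.Dict.getD_empty, List.nil_append, List.filter_map]
  rw [List.map_map]
  rfl

lemma pvOuts_eq (trs : List (String × String × Int)) (node : String) (used : PySem.Set (String × String)) :
    (PySem.Dict.getD (pvAdj trs) node []).filter (fun g => !(PySem.Set.contains used (node, g)))
      = (trs.filter (fun e => e.1 == node && !(PySem.Set.contains used (e.1, e.2.1)))).map (fun e => e.2.1) := by
  rw [pvAdj_getD, List.filter_map, List.filter_filter]
  congr 1
  apply List.filter_congr
  intro e _
  by_cases h : e.1 = node
  · simp [h, Function.comp]
  · have hb : (e.1 == node) = false := by simp [h]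
    simp [hb, Function.comp]

-- pvG does not depend on its fuel once the fuel exceeds the number of unconsumed edges
lemma pvG_irrel (trs : List (String × String × Int)) (goal : String) :
    ∀ (n1 n2 : Nat) (start : String) (path : List String) (depth : Int) (used : PySem.Set (String × String)),
      pvU trs used < n1 → pvU trs used < n2 →
      pvG n1 trs start goal path depth used = pvG n2 trs start goal path depth used := by
  intro n1
  induction n1 with
  | zero => intro n2 st p d used h1 _; omega
  | succ m ih =>
    intro n2 st p d used h1 h2
    cases n2 with
    | zero => omega
    | succ m2 =>
      simp only [pvG]
      by_cases hd : d > 1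
      · simp [hd]
      · simp only [if_neg hd]
        by_cases hg : ((trs.filter (fun e => e.1 == st && !(PySem.Set.contains used (e.1, e.2.1)))).map (fun e => e.2.1)).contains goal
        · rw [if_pos hg, if_pos hg]
        · rw [if_neg hg, if_neg hg]
          rw [PySem.List.foldl_append_eq_flatMap, PySem.List.foldl_append_eq_flatMap,
            List.nil_append, List.nil_append]
          apply List.flatMap_congr
          intro g hgm
          rcases List.mem_map.1 hgm with ⟨e, hef, rfl⟩
          have he : e ∈ trs := (List.mem_filter.1 hef).1
          have hcond := (List.mem_filter.1 hef).2
          have hcond' : e.1 = st ∧ PySem.Set.contains used (e.1, e.2.1) = false := by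
            simpa using hcond
          have hes : e.1 = st := hcond'.1
          have hun : PySem.Set.contains used (e.1, e.2.1) = false := hcond'.2
          have hlt : pvU trs (PySem.Set.add used (st, e.2.1)) < pvU trs used := by
            apply pvU_add_lt trs used (st, e.2.1) e he
            · simp [pvKey, hes]
            · rw [← hes]; exact hun
          exact ih m2 _ _ _ _ (by omega) (by omega)

lemma pvMeasure_cons (trs : List (String × String × Int)) (fr : String × List String × Int × PySem.Set (String × String)) (rest : List (String × List String × Int × PySem.Set (String × String))) :
    pvMeasure trs (fr :: rest) = pvF trs.length (pvU trs fr.2.2.2) + pvMeasure trs rest := by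
  simp [pvMeasure]

-- Source B's worklist loop computes, frame by frame, the concatenation of pvG over the stack
lemma pvBLoop_spec (trs : List (String × String × Int)) (goal : String) :
    ∀ (n : Nat) (stack : List (String × List String × Int × PySem.Set (String × String))) (results : List (List String)),
      pvMeasure trs stack ≤ n →
      pvBLoop n goal (pvAdj trs) stack results
        = results ++ stack.flatMap (fun fr => pvG (trs.length + 1) trs fr.1 goal fr.2.1 fr.2.2.1 fr.2.2.2) := by
  intro n
  induction n with
  | zero =>
    intro stack results hm
    cases stack with
    | nil => simp [pvBLoop]
    | cons fr rest =>
      rw [pvMeasure_cons] at hm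
      have := pvF_pos trs.length (pvU trs fr.2.2.2)
      omega
  | succ m ih =>
    intro stack results hm
    cases stack with
    | nil => simp [pvBLoop]
    | cons fr rest =>
      obtain ⟨node, p, d, used⟩ := fr
      rw [pvMeasure_cons] at hm
      have hm' : pvF trs.length (pvU trs used) + pvMeasure trs rest ≤ m + 1 := hm
      have hUle : pvU trs used ≤ trs.length := pvU_le trs used
      simp only [pvBLoop]
      by_cases hd : d > 1
      · rw [if_pos hd, ih rest results (by have := pvF_pos trs.length (pvU trs used); omega)]
        have : pvG (trs.length + 1) trs node goal p d used = [] := by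
          simp only [pvG, if_pos hd]
        simp [this]
      · rw [if_neg hd]
        rw [pvOuts_eq trs node used]
        set OG := (trs.filter (fun e => e.1 == node && !(PySem.Set.contains used (e.1, e.2.1)))).map (fun e => e.2.1) with hOG
        have hGfr : pvG (trs.length + 1) trs node goal p d used
            = if OG.contains goal then [p ++ [node, goal]]
              else OG.flatMap (fun g => pvG trs.length trs g goal (p ++ [node]) (d + 1) (PySem.Set.add used (node, g))) := by
          simp only [pvG, if_neg hd, ← hOG]
          by_cases hg : OG.contains goal
          · rw [if_pos hg, if_pos hg]
          · rw [if_neg hg, if_neg hg, PySem.List.foldl_append_eq_flatMap, List.nil_append]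
        have hcons : List.flatMap (fun fr => pvG (trs.length + 1) trs fr.1 goal fr.2.1 fr.2.2.1 fr.2.2.2) ((node, p, d, used) :: rest)
            = pvG (trs.length + 1) trs node goal p d used
              ++ List.flatMap (fun fr => pvG (trs.length + 1) trs fr.1 goal fr.2.1 fr.2.2.1 fr.2.2.2) rest := rfl
        by_cases hg : OG.contains goal
        · rw [if_pos hg, ih rest _ (by have := pvF_pos trs.length (pvU trs used); omega)]
          rw [hcons, hGfr, if_pos hg]
          simp
        · rw [if_neg hg]
          -- each member of OG is an unconsumed edge out of node
          have hmem : ∀ g ∈ OG, ∃ e ∈ trs, e.1 = node ∧ e.2.1 = g ∧ PySem.Set.contains used (node, g) = false := by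
            intro g hgm
            rcases List.mem_map.1 hgm with ⟨e, hef, rfl⟩
            have he : e ∈ trs := (List.mem_filter.1 hef).1
            have hcond := (List.mem_filter.1 hef).2
            have hcond' : e.1 = node ∧ PySem.Set.contains used (e.1, e.2.1) = false := by
              simpa using hcond
            exact ⟨e, he, hcond'.1, rfl, by rw [← hcond'.1]; exact hcond'.2⟩
          have hchildU : ∀ g ∈ OG, pvU trs (PySem.Set.add used (node, g)) < pvU trs used := by
            intro g hgm
            rcases hmem g hgm with ⟨e, he, hes, hgg, hun⟩
            exact pvU_add_lt trs used (node, g) e he (by simp [pvKey, hes, hgg]) hun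
          -- measure of the new stack
          have hlenOG : OG.length ≤ trs.length := by
            calc OG.length = (trs.filter (fun e => e.1 == node && !(PySem.Set.contains used (e.1, e.2.1)))).length := by
                  simp [hOG]
              _ ≤ trs.length := List.length_filter_le _ _
          have hmnew : pvMeasure trs ((OG.map (fun g => (g, p ++ [node], d + 1, PySem.Set.add used (node, g)))) ++ rest) ≤ m := by
            cases hOGe : OG with
            | nil =>
              simp only [hOGe, List.map_nil, List.nil_append]
              have := pvF_pos trs.length (pvU trs used)
              omega
            | cons g0 gs =>
              -- pvU trs used ≥ 1
              have hU1 : 1 ≤ pvU trs used := by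
                have := hchildU g0 (by rw [hOGe]; exact List.mem_cons_self)
                omega
              obtain ⟨u, hu⟩ : ∃ u, pvU trs used = u + 1 := ⟨pvU trs used - 1, by omega⟩
              rw [← hOGe]
              have hsum : pvMeasure trs ((OG.map (fun g => (g, p ++ [node], d + 1, PySem.Set.add used (node, g)))) ++ rest)
                  = (OG.map (fun g => pvF trs.length (pvU trs (PySem.Set.add used (node, g))))).sum + pvMeasure trs rest := by
                simp only [pvMeasure, List.map_append, List.sum_append, List.map_map]
                rfl
              rw [hsum]
              have hbound : (OG.map (fun g => pvF trs.length (pvU trs (PySem.Set.add used (node, g))))).sum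
                  ≤ OG.length * pvF trs.length u := by
                have := List.sum_le_card_nsmul (OG.map (fun g => pvF trs.length (pvU trs (PySem.Set.add used (node, g))))) (pvF trs.length u) ?_
                · simpa using this
                · intro x hx
                  rcases List.mem_map.1 hx with ⟨g, hgm, rfl⟩
                  apply pvF_mono
                  have := hchildU g hgm
                  omega
              have hstep : OG.length * pvF trs.length u ≤ trs.length * pvF trs.length u :=
                Nat.mul_le_mul_right _ hlenOG
              have hfU : pvF trs.length (pvU trs used) = 1 + trs.length * pvF trs.length u := by
                rw [hu]; rfl
              omega
          rw [ih _ results hmnew]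
          rw [hcons, hGfr, if_neg hg]
          rw [List.flatMap_append, List.flatMap_map]
          congr 1
          congr 1
          apply List.flatMap_congr
          intro g hgm
          have hlt := hchildU g hgm
          exact pvG_irrel trs goal (trs.length + 1) trs.length g (p ++ [node]) (d + 1)
            (PySem.Set.add used (node, g)) (by omega) (by omega)

-- ===== VERDICT (by name: the statement is the Claim_ definition above) =====
theorem find_time_range_rec_spec : Claim_equal_find_time_range_rec := by
  intro start goal trs path depth _ hpre
  unfold Spec_find_time_range_rec find_time_range_rec find_time_range_rec_alt
  have hA : pvAFuel (trs.length + 1) start goal trs path depth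
      = pvG (trs.length + 1) trs start goal path depth PySem.Set.empty :=
    pvMainA trs hpre (trs.length + 1) PySem.Set.empty trs start goal path depth
      (by simp [PySem.Set.contains]) (by omega)
  have hB : pvBLoop (pvF trs.length trs.length) goal (pvAdj trs) [(start, path, depth, PySem.Set.empty)] []
      = pvG (trs.length + 1) trs start goal path depth PySem.Set.empty := by
    rw [pvBLoop_spec trs goal _ _ _ ?_]
    · simp
    · have hU : pvU trs PySem.Set.empty ≤ trs.length := pvU_le trs PySem.Set.empty
      calc pvMeasure trs [(start, path, depth, PySem.Set.empty)]
          = pvF trs.length (pvU trs PySem.Set.empty) := by simp [pvMeasure]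
        _ ≤ pvF trs.length trs.length := pvF_mono _ hU
  rw [hA, hB]
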